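-- pv_equiv track=rewrite | github.com/Ginger013/CS61-A | homework/hw03/hw03.py | digit_distance
-- ===== SOURCE A (Python) =====
-- def digit_distance(n):
--     """Determines the digit distance of n.
--
--     >>> digit_distance(3)
--     0
--     >>> digit_distance(777)
--     0
--     >>> digit_distance(314)
--     5
--     >>> digit_distance(31415926535)
--     32
--     >>> digit_distance(3464660003)
--     16
--     >>> from construct_check import check
--     >>> # ban all loops
--     >>> check(HW_SOURCE_FILE, 'digit_distance',
--     ...       ['For', 'While'])
--     True
--     """
--     "*** YOUR CODE HERE ***"
--     if n < 10:
--         return 0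
--     else:
--         return abs(n % 10 - (n // 10) % 10) + digit_distance(n // 10)
--
--     """
--     Alternative:
--     def helper(n, pre_digit):
--         if n == 0:
--             return 0
--         else:
--             cur_digit = n % 10
--             return abs(cur_digit - pre_digit) + helper(n // 10, cur_digit)
--     return helper(n // 10, n % 10)
--     """
-- ===== SOURCE B (Python) =====
-- def digit_distance(n):
--     if n < 10:
--         return 0
--     ds = []
--     m = n
--     while m > 0:
--         ds.append(m % 10)
--         m //= 10
--     return sum(abs(a - b) for a, b in zip(ds, ds[1:]))
-- ===== Notes on version B (the rewrite author's own statement) =====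
-- stated objective: alternative
-- what changed: Replaces A's recursion (abs of the two low digits plus a recursive call on n//10) with an iterative version: build the digit list once with a while loop, then sum the absolute differences of adjacent pairs with zip.
import Mathlib
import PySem

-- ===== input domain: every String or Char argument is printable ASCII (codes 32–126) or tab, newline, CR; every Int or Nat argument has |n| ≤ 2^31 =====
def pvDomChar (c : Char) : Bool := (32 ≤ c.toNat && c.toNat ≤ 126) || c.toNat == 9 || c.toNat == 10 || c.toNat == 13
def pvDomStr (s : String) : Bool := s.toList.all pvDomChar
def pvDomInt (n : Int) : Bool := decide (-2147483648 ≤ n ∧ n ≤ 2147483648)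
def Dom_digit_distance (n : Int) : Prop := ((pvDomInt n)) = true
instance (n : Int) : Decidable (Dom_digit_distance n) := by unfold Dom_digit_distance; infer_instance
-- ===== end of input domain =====

-- B replaces A's recursion with an iterative digit-list build plus a zip-pass over adjacent pairs (alternative decomposition, same cost).


-- ===== PORT A =====
def digit_distance (n : Int) : Int :=
  if n < 10 then 0
  else |PySem.Int.mod n 10 - PySem.Int.mod (PySem.Int.floordiv n 10) 10|
       + digit_distance (PySem.Int.floordiv n 10)
  termination_by n.toNat
  decreasing_by
    rw [PySem.Int.floordiv_eq_ediv_of_pos (by norm_num)]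
    omega

-- ===== PORT B =====
-- the while loop collecting m % 10 and setting m //= 10
def pvDigits (m : Int) : List Int :=
  if 0 < m then PySem.Int.mod m 10 :: pvDigits (PySem.Int.floordiv m 10)
  else []
  termination_by m.toNat
  decreasing_by
    rw [PySem.Int.floordiv_eq_ediv_of_pos (by norm_num)]
    omega

def digit_distance_alt (n : Int) : Int :=
  if n < 10 then 0
  else
    let ds := pvDigits n
    ((ds.zip (ds.drop 1)).foldl (fun acc p => acc + |p.1 - p.2|) 0)

-- ===== PRECONDITION & SPEC =====
def Spec_digit_distance (n : Int) (out : Int) : Prop := out = digit_distance_alt n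
instance (n : Int) (out : Int) : Decidable (Spec_digit_distance n out) := by unfold Spec_digit_distance; infer_instance

-- ===== CLAIM (what is proved, stated in full; the proofs are below) =====
def Claim_equal_digit_distance : Prop := ∀ (n : Int), Dom_digit_distance n → Spec_digit_distance n (digit_distance n)

-- ===== LEMMAS AND PROOFS =====
def pvSumZ (l : List Int) : Int := (l.zip (l.drop 1)).foldl (fun acc p => acc + |p.1 - p.2|) 0

theorem pv_foldl_shift (xs : List (Int × Int)) (c : Int) :
    xs.foldl (fun acc p => acc + |p.1 - p.2|) c = c + xs.foldl (fun acc p => acc + |p.1 - p.2|) 0 := by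
  induction xs generalizing c with
  | nil => simp
  | cons x xs ih =>
    simp only [List.foldl_cons]
    rw [ih (c + |x.1 - x.2|), ih (0 + |x.1 - x.2|)]
    ring

theorem pvSumZ_cons_cons (a b : Int) (r : List Int) :
    pvSumZ (a :: b :: r) = |a - b| + pvSumZ (b :: r) := by
  simp only [pvSumZ, List.drop, List.zip, List.zipWith, List.foldl_cons]
  rw [pv_foldl_shift]
  ring

theorem pvDigits_pos {m : Int} (h : 0 < m) :
    pvDigits m = PySem.Int.mod m 10 :: pvDigits (PySem.Int.floordiv m 10) := by
  rw [pvDigits]; simp [h]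

theorem pv_key : ∀ (k : Nat) (n : Int), n.toNat = k → 1 ≤ n → digit_distance n = pvSumZ (pvDigits n) := by
  intro k
  induction k using Nat.strong_induction_on with
  | _ k ih =>
    intro n hk h1
    by_cases h10 : n < 10
    · -- 1 ≤ n < 10 : one digit
      have hq : PySem.Int.floordiv n 10 = 0 := by
        rw [PySem.Int.floordiv_eq_ediv_of_pos (by norm_num)]; omega
      rw [digit_distance, if_pos h10, pvDigits_pos (by omega), hq, pvDigits]
      simp [pvSumZ]
    · -- n ≥ 10 : peel two digits
      have hq10 : PySem.Int.floordiv n 10 = n / 10 :=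
        PySem.Int.floordiv_eq_ediv_of_pos (by norm_num)
      have hq1 : 1 ≤ PySem.Int.floordiv n 10 := by rw [hq10]; omega
      have hqlt : (PySem.Int.floordiv n 10).toNat < k := by rw [hq10]; omega
      rw [digit_distance, if_neg h10, pvDigits_pos (by omega : (0:Int) < n),
          pvDigits_pos (by omega : (0:Int) < PySem.Int.floordiv n 10)]
      rw [pvSumZ_cons_cons, ← pvDigits_pos (by omega : (0:Int) < PySem.Int.floordiv n 10)]
      rw [ih _ hqlt (PySem.Int.floordiv n 10) rfl hq1]

-- ===== VERDICT (by name: the statement is the Claim_ definition above) =====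
theorem digit_distance_spec : Claim_equal_digit_distance := by
  intro n _
  unfold Spec_digit_distance digit_distance_alt
  by_cases h10 : n < 10
  · rw [digit_distance, if_pos h10, if_pos h10]
  · rw [if_neg h10, pv_key n.toNat n rfl (by omega)]
    rfl
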